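-- pv_equiv track=rewrite | github.com/AI-SSD/ai-ssd-patch-generation-and-validation | pipeline/cve_aggregator/utils/version_mapping.py | get_ubuntu_version
-- ===== SOURCE A (Python) =====
-- from typing import Dict, List, Optional
--
-- _GLIBC_TO_UBUNTU: Dict[str, str] = {
--     # Ubuntu 6.06 (Dapper)
--     "2.3.6": "6.06",
--     # Ubuntu 8.04 (Hardy)
--     "2.7":   "8.04",
--     # Ubuntu 10.04 (Lucid)
--     "2.11":  "10.04",
--     "2.11.1": "10.04",
--     "2.11.2": "10.04",
--     "2.11.3": "10.04",
--     # Ubuntu 12.04 (Precise)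
--     "2.15":  "12.04",
--     # Ubuntu 14.04 (Trusty)
--     "2.19":  "14.04",
--     # Ubuntu 16.04 (Xenial)
--     "2.23":  "16.04",
--     # Ubuntu 18.04 (Bionic)
--     "2.27":  "18.04",
--     # Ubuntu 20.04 (Focal)
--     "2.31":  "20.04",
--     # Ubuntu 22.04 (Jammy)
--     "2.35":  "22.04",
--     # Ubuntu 24.04 (Noble)
--     "2.39":  "24.04",
-- }
--
-- _GLIBC_VERSIONS_SORTED = sorted(
--     _GLIBC_TO_UBUNTU.keys(),
--     key=lambda v: tuple(int(x) for x in v.split(".")),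
-- )
--
-- def get_ubuntu_version(glibc_version: str) -> str:
--     """Map a glibc version string to the Ubuntu release that ships it.
--
--     If an exact match is not found, the closest *older* Ubuntu release
--     whose glibc is ≤ the given version is returned (i.e. the vulnerable
--     version would be present on that release).
--
--     Parameters
--     ----------
--     glibc_version : str
--         A glibc version string (e.g. ``"2.17"``).
--
--     Returns
--     -------
--     str
--         Ubuntu release identifier, or empty string if no match.
--     """
--     if not glibc_version:
--         return ""
--
--     # Exact match
--     if glibc_version in _GLIBC_TO_UBUNTU:
--         return _GLIBC_TO_UBUNTU[glibc_version]
--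
--     # Closest match: find the largest glibc version ≤ the given one
--     try:
--         target = tuple(int(x) for x in glibc_version.split("."))
--     except ValueError:
--         return ""
--
--     best = ""
--     for ver_str in _GLIBC_VERSIONS_SORTED:
--         ver_tup = tuple(int(x) for x in ver_str.split("."))
--         if ver_tup <= target:
--             best = _GLIBC_TO_UBUNTU[ver_str]
--         else:
--             break
--     return best
-- ===== SOURCE B (Python) =====
-- # Binary search over a precomputed sorted (version-tuple, release) table; no dict, no linear scan.
-- _TABLE = [
--     ((2, 3, 6), "6.06"),
--     ((2, 7), "8.04"),
--     ((2, 11), "10.04"),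
--     ((2, 11, 1), "10.04"),
--     ((2, 11, 2), "10.04"),
--     ((2, 11, 3), "10.04"),
--     ((2, 15), "12.04"),
--     ((2, 19), "14.04"),
--     ((2, 23), "16.04"),
--     ((2, 27), "18.04"),
--     ((2, 31), "20.04"),
--     ((2, 35), "22.04"),
--     ((2, 39), "24.04"),
-- ]
--
-- def get_ubuntu_version(glibc_version: str) -> str:
--     try:
--         target = tuple(int(x) for x in glibc_version.split("."))
--     except ValueError:
--         return ""
--     lo, hi = 0, len(_TABLE)
--     while lo < hi:
--         mid = (lo + hi) // 2
--         if target < _TABLE[mid][0]: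
--             hi = mid
--         else:
--             lo = mid + 1
--     return _TABLE[lo - 1][1] if lo else ""
-- ===== Notes on version B (the rewrite author's own statement) =====
-- stated objective: alternative
-- what changed: B drops the dict shortcut and the linear accumulate-with-break scan entirely: it parses the version once and runs a hand-written binary search (bisect_right semantics) over one precomputed sorted (version-tuple, release) table, returning the entry before the insertion point.
import Mathlib
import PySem

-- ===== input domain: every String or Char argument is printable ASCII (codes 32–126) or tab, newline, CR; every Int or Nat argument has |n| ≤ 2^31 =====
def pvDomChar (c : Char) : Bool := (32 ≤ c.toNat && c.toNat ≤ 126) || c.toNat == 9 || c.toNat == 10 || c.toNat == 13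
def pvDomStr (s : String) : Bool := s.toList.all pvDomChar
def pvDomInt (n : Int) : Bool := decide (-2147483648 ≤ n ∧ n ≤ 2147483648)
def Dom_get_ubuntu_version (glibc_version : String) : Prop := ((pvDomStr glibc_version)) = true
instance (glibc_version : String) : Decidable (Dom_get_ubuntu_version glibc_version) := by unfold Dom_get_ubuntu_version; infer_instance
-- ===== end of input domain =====

-- B replaces A's dict shortcut + linear accumulate-with-break scan by a single binary search
-- over a precomputed sorted (version-tuple, release) table (objective: idiomatic/alternative).

-- Python tuple comparison on int tuples (lexicographic), shared semantic primitive of both ports.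
def leTup : List Int → List Int → Bool
  | [], _ => true
  | _ :: _, [] => false
  | a :: as, b :: bs => if a < b then true else if b < a then false else leTup as bs

def ltTup : List Int → List Int → Bool
  | [], [] => false
  | [], _ :: _ => true
  | _ :: _, [] => false
  | a :: as, b :: bs => if a < b then true else if b < a then false else ltTup as bs

-- tuple(int(x) for x in s.split(".")): first int() failure = ValueError = none (same expression in A and B).
def pyTupOfStr? (s : String) : Option (List Int) :=
  -- s.split(".") with a nonempty literal separator never raises: split? is always some here
  (PySem.Str.split? s ".").bind (·.mapM PySem.Int.ofStr?)

-- ===== PORT A =====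
-- _GLIBC_TO_UBUNTU (insertion order; keys distinct, so Dict.mk is the dict literal)
def glibcToUbuntu : PySem.Dict String String := PySem.Dict.mk [("2.3.6", "6.06"), ("2.7", "8.04"), ("2.11", "10.04"), ("2.11.1", "10.04"), ("2.11.2", "10.04"), ("2.11.3", "10.04"), ("2.15", "12.04"), ("2.19", "14.04"), ("2.23", "16.04"), ("2.27", "18.04"), ("2.31", "20.04"), ("2.35", "22.04"), ("2.39", "24.04")]

-- _GLIBC_VERSIONS_SORTED: module-load constant; the dict's keys are already in ascending
-- tuple order, so Python's sorted(...) returns them unchanged (stable sort of a sorted list).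
def glibcVersionsSorted : List String := ["2.3.6", "2.7", "2.11", "2.11.1", "2.11.2", "2.11.3", "2.15", "2.19", "2.23", "2.27", "2.31", "2.35", "2.39"]

-- the for-loop: best accumulator, break at the first key > target
def scanBest : List String → List Int → String → String
  | [], _, best => best
  | v :: rest, target, best =>
    match pyTupOfStr? v with
    | some vt => if leTup vt target then scanBest rest target ((glibcToUbuntu.get? v).getD "") else best
    | none => best  -- unreachable: every table key parses (port of the bare, never-raising int())

def get_ubuntu_version (glibc_version : String) : String :=
  if glibc_version = "" then ""
  else
    match glibcToUbuntu.get? glibc_version with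
    | some v => v
    | none =>
      match pyTupOfStr? glibc_version with
      | none => ""
      | some target => scanBest glibcVersionsSorted target ""

-- ===== PORT B =====
-- _TABLE of Source B (already sorted, written as a literal there)
def bTable : List (List Int × String) := [([(2:Int), (3:Int), (6:Int)], "6.06"), ([(2:Int), (7:Int)], "8.04"), ([(2:Int), (11:Int)], "10.04"), ([(2:Int), (11:Int), (1:Int)], "10.04"), ([(2:Int), (11:Int), (2:Int)], "10.04"), ([(2:Int), (11:Int), (3:Int)], "10.04"), ([(2:Int), (15:Int)], "12.04"), ([(2:Int), (19:Int)], "14.04"), ([(2:Int), (23:Int)], "16.04"), ([(2:Int), (27:Int)], "18.04"), ([(2:Int), (31:Int)], "20.04"), ([(2:Int), (35:Int)], "22.04"), ([(2:Int), (39:Int)], "24.04")]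

-- the while-loop of Source B; lo, hi are always in [0, 13] so Nat carries Python's ints exactly
def bisectLoop (target : List Int) (lo hi : Nat) : Nat :=
  if lo < hi then
    let mid := (lo + hi) / 2
    if ltTup target ((bTable.getD mid ([], "")).1) then bisectLoop target lo mid
    else bisectLoop target (mid + 1) hi
  else lo
termination_by hi - lo
decreasing_by all_goals omega

def get_ubuntu_version_alt (glibc_version : String) : String :=
  match pyTupOfStr? glibc_version with
  | none => ""
  | some target =>
    let lo := bisectLoop target 0 13
    if lo ≠ 0 then (bTable.getD (lo - 1) ([], "")).2 else ""

-- ===== PRECONDITION & SPEC =====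
def Spec_get_ubuntu_version (glibc_version : String) (out : String) : Prop := out = get_ubuntu_version_alt glibc_version
instance (glibc_version : String) (out : String) : Decidable (Spec_get_ubuntu_version glibc_version out) := by unfold Spec_get_ubuntu_version; infer_instance

-- ===== CLAIM (what is proved, stated in full; the proofs are below) =====
def Claim_equal_get_ubuntu_version : Prop := ∀ (glibc_version : String), Dom_get_ubuntu_version glibc_version → Spec_get_ubuntu_version glibc_version (get_ubuntu_version glibc_version)

-- ===== LEMMAS AND PROOFS =====

theorem ltTup_eq_not_leTup : ∀ a b, ltTup a b = !leTup b a := by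
  intro a
  induction a with
  | nil => intro b; cases b <;> simp [ltTup, leTup]
  | cons x as ih =>
    intro b
    cases b with
    | nil => simp [ltTup, leTup]
    | cons y bs =>
      simp only [ltTup, leTup]
      split_ifs <;> first | (simp_all; omega) | simp_all

theorem leTup_trans : ∀ a b c, leTup a b = true → leTup b c = true → leTup a c = true := by
  intro a
  induction a with
  | nil => intro b c _ _; simp [leTup]
  | cons x as ih =>
    intro b c hab hbc
    cases b with
    | nil => simp [leTup] at hab
    | cons y bs =>
      cases c with
      | nil => simp [leTup] at hbc
      | cons z cs =>
        simp only [leTup] at hab hbc ⊢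
        split_ifs at hab hbc ⊢ <;> try omega
        all_goals (first | rfl | exact ih bs cs hab hbc)

-- evaluated parses and lookups of the 13 table keys (closed terms)
theorem pk0 : pyTupOfStr? "2.3.6" = some [(2:Int), (3:Int), (6:Int)] := by decide
theorem pk1 : pyTupOfStr? "2.7" = some [(2:Int), (7:Int)] := by decide
theorem pk2 : pyTupOfStr? "2.11" = some [(2:Int), (11:Int)] := by decide
theorem pk3 : pyTupOfStr? "2.11.1" = some [(2:Int), (11:Int), (1:Int)] := by decide
theorem pk4 : pyTupOfStr? "2.11.2" = some [(2:Int), (11:Int), (2:Int)] := by decide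
theorem pk5 : pyTupOfStr? "2.11.3" = some [(2:Int), (11:Int), (3:Int)] := by decide
theorem pk6 : pyTupOfStr? "2.15" = some [(2:Int), (15:Int)] := by decide
theorem pk7 : pyTupOfStr? "2.19" = some [(2:Int), (19:Int)] := by decide
theorem pk8 : pyTupOfStr? "2.23" = some [(2:Int), (23:Int)] := by decide
theorem pk9 : pyTupOfStr? "2.27" = some [(2:Int), (27:Int)] := by decide
theorem pk10 : pyTupOfStr? "2.31" = some [(2:Int), (31:Int)] := by decide
theorem pk11 : pyTupOfStr? "2.35" = some [(2:Int), (35:Int)] := by decide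
theorem pk12 : pyTupOfStr? "2.39" = some [(2:Int), (39:Int)] := by decide
theorem lk0 : (glibcToUbuntu.get? "2.3.6").getD "" = "6.06" := by decide
theorem lk1 : (glibcToUbuntu.get? "2.7").getD "" = "8.04" := by decide
theorem lk2 : (glibcToUbuntu.get? "2.11").getD "" = "10.04" := by decide
theorem lk3 : (glibcToUbuntu.get? "2.11.1").getD "" = "10.04" := by decide
theorem lk4 : (glibcToUbuntu.get? "2.11.2").getD "" = "10.04" := by decide
theorem lk5 : (glibcToUbuntu.get? "2.11.3").getD "" = "10.04" := by decide
theorem lk6 : (glibcToUbuntu.get? "2.15").getD "" = "12.04" := by decide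
theorem lk7 : (glibcToUbuntu.get? "2.19").getD "" = "14.04" := by decide
theorem lk8 : (glibcToUbuntu.get? "2.23").getD "" = "16.04" := by decide
theorem lk9 : (glibcToUbuntu.get? "2.27").getD "" = "18.04" := by decide
theorem lk10 : (glibcToUbuntu.get? "2.31").getD "" = "20.04" := by decide
theorem lk11 : (glibcToUbuntu.get? "2.35").getD "" = "22.04" := by decide
theorem lk12 : (glibcToUbuntu.get? "2.39").getD "" = "24.04" := by decide

-- the heart: A's scan equals B's binary search, for every target tuple
set_option maxHeartbeats 1600000 in
theorem scan_eq_bisect (t : List Int) :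
    scanBest glibcVersionsSorted t "" =
      (if bisectLoop t 0 13 ≠ 0 then (bTable.getD (bisectLoop t 0 13 - 1) ([], "")).2 else "") := by
    by_cases h12 : leTup [(2:Int), (39:Int)] t = true
    · have h0 : leTup [(2:Int), (3:Int), (6:Int)] t = true := leTup_trans _ _ _ (by decide) h12
      have h1 : leTup [(2:Int), (7:Int)] t = true := leTup_trans _ _ _ (by decide) h12
      have h2 : leTup [(2:Int), (11:Int)] t = true := leTup_trans _ _ _ (by decide) h12
      have h3 : leTup [(2:Int), (11:Int), (1:Int)] t = true := leTup_trans _ _ _ (by decide) h12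
      have h4 : leTup [(2:Int), (11:Int), (2:Int)] t = true := leTup_trans _ _ _ (by decide) h12
      have h5 : leTup [(2:Int), (11:Int), (3:Int)] t = true := leTup_trans _ _ _ (by decide) h12
      have h6 : leTup [(2:Int), (15:Int)] t = true := leTup_trans _ _ _ (by decide) h12
      have h7 : leTup [(2:Int), (19:Int)] t = true := leTup_trans _ _ _ (by decide) h12
      have h8 : leTup [(2:Int), (23:Int)] t = true := leTup_trans _ _ _ (by decide) h12
      have h9 : leTup [(2:Int), (27:Int)] t = true := leTup_trans _ _ _ (by decide) h12
      have h10 : leTup [(2:Int), (31:Int)] t = true := leTup_trans _ _ _ (by decide) h12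
      have h11 : leTup [(2:Int), (35:Int)] t = true := leTup_trans _ _ _ (by decide) h12
      simp [scanBest, bisectLoop, glibcVersionsSorted, bTable, ltTup_eq_not_leTup, pk0, pk1, pk2, pk3, pk4, pk5, pk6, pk7, pk8, pk9, pk10, pk11, pk12, lk12, h0, h1, h2, h3, h4, h5, h6, h7, h8, h9, h10, h11, h12]
    · replace h12 : leTup [(2:Int), (39:Int)] t = false := by simpa using h12
      by_cases h11 : leTup [(2:Int), (35:Int)] t = true
      · have h0 : leTup [(2:Int), (3:Int), (6:Int)] t = true := leTup_trans _ _ _ (by decide) h11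
        have h1 : leTup [(2:Int), (7:Int)] t = true := leTup_trans _ _ _ (by decide) h11
        have h2 : leTup [(2:Int), (11:Int)] t = true := leTup_trans _ _ _ (by decide) h11
        have h3 : leTup [(2:Int), (11:Int), (1:Int)] t = true := leTup_trans _ _ _ (by decide) h11
        have h4 : leTup [(2:Int), (11:Int), (2:Int)] t = true := leTup_trans _ _ _ (by decide) h11
        have h5 : leTup [(2:Int), (11:Int), (3:Int)] t = true := leTup_trans _ _ _ (by decide) h11
        have h6 : leTup [(2:Int), (15:Int)] t = true := leTup_trans _ _ _ (by decide) h11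
        have h7 : leTup [(2:Int), (19:Int)] t = true := leTup_trans _ _ _ (by decide) h11
        have h8 : leTup [(2:Int), (23:Int)] t = true := leTup_trans _ _ _ (by decide) h11
        have h9 : leTup [(2:Int), (27:Int)] t = true := leTup_trans _ _ _ (by decide) h11
        have h10 : leTup [(2:Int), (31:Int)] t = true := leTup_trans _ _ _ (by decide) h11
        simp [scanBest, bisectLoop, glibcVersionsSorted, bTable, ltTup_eq_not_leTup, pk0, pk1, pk2, pk3, pk4, pk5, pk6, pk7, pk8, pk9, pk10, pk11, pk12, lk11, h0, h1, h2, h3, h4, h5, h6, h7, h8, h9, h10, h11, h12]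
      · replace h11 : leTup [(2:Int), (35:Int)] t = false := by simpa using h11
        by_cases h10 : leTup [(2:Int), (31:Int)] t = true
        · have h0 : leTup [(2:Int), (3:Int), (6:Int)] t = true := leTup_trans _ _ _ (by decide) h10
          have h1 : leTup [(2:Int), (7:Int)] t = true := leTup_trans _ _ _ (by decide) h10
          have h2 : leTup [(2:Int), (11:Int)] t = true := leTup_trans _ _ _ (by decide) h10
          have h3 : leTup [(2:Int), (11:Int), (1:Int)] t = true := leTup_trans _ _ _ (by decide) h10
          have h4 : leTup [(2:Int), (11:Int), (2:Int)] t = true := leTup_trans _ _ _ (by decide) h10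
          have h5 : leTup [(2:Int), (11:Int), (3:Int)] t = true := leTup_trans _ _ _ (by decide) h10
          have h6 : leTup [(2:Int), (15:Int)] t = true := leTup_trans _ _ _ (by decide) h10
          have h7 : leTup [(2:Int), (19:Int)] t = true := leTup_trans _ _ _ (by decide) h10
          have h8 : leTup [(2:Int), (23:Int)] t = true := leTup_trans _ _ _ (by decide) h10
          have h9 : leTup [(2:Int), (27:Int)] t = true := leTup_trans _ _ _ (by decide) h10
          simp [scanBest, bisectLoop, glibcVersionsSorted, bTable, ltTup_eq_not_leTup, pk0, pk1, pk2, pk3, pk4, pk5, pk6, pk7, pk8, pk9, pk10, pk11, lk10, h0, h1, h2, h3, h4, h5, h6, h7, h8, h9, h10, h11, h12]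
        · replace h10 : leTup [(2:Int), (31:Int)] t = false := by simpa using h10
          by_cases h9 : leTup [(2:Int), (27:Int)] t = true
          · have h0 : leTup [(2:Int), (3:Int), (6:Int)] t = true := leTup_trans _ _ _ (by decide) h9
            have h1 : leTup [(2:Int), (7:Int)] t = true := leTup_trans _ _ _ (by decide) h9
            have h2 : leTup [(2:Int), (11:Int)] t = true := leTup_trans _ _ _ (by decide) h9
            have h3 : leTup [(2:Int), (11:Int), (1:Int)] t = true := leTup_trans _ _ _ (by decide) h9
            have h4 : leTup [(2:Int), (11:Int), (2:Int)] t = true := leTup_trans _ _ _ (by decide) h9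
            have h5 : leTup [(2:Int), (11:Int), (3:Int)] t = true := leTup_trans _ _ _ (by decide) h9
            have h6 : leTup [(2:Int), (15:Int)] t = true := leTup_trans _ _ _ (by decide) h9
            have h7 : leTup [(2:Int), (19:Int)] t = true := leTup_trans _ _ _ (by decide) h9
            have h8 : leTup [(2:Int), (23:Int)] t = true := leTup_trans _ _ _ (by decide) h9
            simp [scanBest, bisectLoop, glibcVersionsSorted, bTable, ltTup_eq_not_leTup, pk0, pk1, pk2, pk3, pk4, pk5, pk6, pk7, pk8, pk9, pk10, lk9, h0, h1, h2, h3, h4, h5, h6, h7, h8, h9, h10]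
          · replace h9 : leTup [(2:Int), (27:Int)] t = false := by simpa using h9
            by_cases h8 : leTup [(2:Int), (23:Int)] t = true
            · have h0 : leTup [(2:Int), (3:Int), (6:Int)] t = true := leTup_trans _ _ _ (by decide) h8
              have h1 : leTup [(2:Int), (7:Int)] t = true := leTup_trans _ _ _ (by decide) h8
              have h2 : leTup [(2:Int), (11:Int)] t = true := leTup_trans _ _ _ (by decide) h8
              have h3 : leTup [(2:Int), (11:Int), (1:Int)] t = true := leTup_trans _ _ _ (by decide) h8
              have h4 : leTup [(2:Int), (11:Int), (2:Int)] t = true := leTup_trans _ _ _ (by decide) h8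
              have h5 : leTup [(2:Int), (11:Int), (3:Int)] t = true := leTup_trans _ _ _ (by decide) h8
              have h6 : leTup [(2:Int), (15:Int)] t = true := leTup_trans _ _ _ (by decide) h8
              have h7 : leTup [(2:Int), (19:Int)] t = true := leTup_trans _ _ _ (by decide) h8
              simp [scanBest, bisectLoop, glibcVersionsSorted, bTable, ltTup_eq_not_leTup, pk0, pk1, pk2, pk3, pk4, pk5, pk6, pk7, pk8, pk9, lk8, h0, h1, h2, h3, h4, h5, h6, h7, h8, h9, h10]
            · replace h8 : leTup [(2:Int), (23:Int)] t = false := by simpa using h8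
              by_cases h7 : leTup [(2:Int), (19:Int)] t = true
              · have h0 : leTup [(2:Int), (3:Int), (6:Int)] t = true := leTup_trans _ _ _ (by decide) h7
                have h1 : leTup [(2:Int), (7:Int)] t = true := leTup_trans _ _ _ (by decide) h7
                have h2 : leTup [(2:Int), (11:Int)] t = true := leTup_trans _ _ _ (by decide) h7
                have h3 : leTup [(2:Int), (11:Int), (1:Int)] t = true := leTup_trans _ _ _ (by decide) h7
                have h4 : leTup [(2:Int), (11:Int), (2:Int)] t = true := leTup_trans _ _ _ (by decide) h7
                have h5 : leTup [(2:Int), (11:Int), (3:Int)] t = true := leTup_trans _ _ _ (by decide) h7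
                have h6 : leTup [(2:Int), (15:Int)] t = true := leTup_trans _ _ _ (by decide) h7
                simp [scanBest, bisectLoop, glibcVersionsSorted, bTable, ltTup_eq_not_leTup, pk0, pk1, pk2, pk3, pk4, pk5, pk6, pk7, pk8, lk7, h0, h1, h2, h3, h4, h5, h6, h7, h8, h10]
              · replace h7 : leTup [(2:Int), (19:Int)] t = false := by simpa using h7
                by_cases h6 : leTup [(2:Int), (15:Int)] t = true
                · have h0 : leTup [(2:Int), (3:Int), (6:Int)] t = true := leTup_trans _ _ _ (by decide) h6
                  have h1 : leTup [(2:Int), (7:Int)] t = true := leTup_trans _ _ _ (by decide) h6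
                  have h2 : leTup [(2:Int), (11:Int)] t = true := leTup_trans _ _ _ (by decide) h6
                  have h3 : leTup [(2:Int), (11:Int), (1:Int)] t = true := leTup_trans _ _ _ (by decide) h6
                  have h4 : leTup [(2:Int), (11:Int), (2:Int)] t = true := leTup_trans _ _ _ (by decide) h6
                  have h5 : leTup [(2:Int), (11:Int), (3:Int)] t = true := leTup_trans _ _ _ (by decide) h6
                  simp [scanBest, bisectLoop, glibcVersionsSorted, bTable, ltTup_eq_not_leTup, pk0, pk1, pk2, pk3, pk4, pk5, pk6, pk7, lk6, h0, h1, h2, h3, h4, h5, h6, h7, h8, h10]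
                · replace h6 : leTup [(2:Int), (15:Int)] t = false := by simpa using h6
                  by_cases h5 : leTup [(2:Int), (11:Int), (3:Int)] t = true
                  · have h0 : leTup [(2:Int), (3:Int), (6:Int)] t = true := leTup_trans _ _ _ (by decide) h5
                    have h1 : leTup [(2:Int), (7:Int)] t = true := leTup_trans _ _ _ (by decide) h5
                    have h2 : leTup [(2:Int), (11:Int)] t = true := leTup_trans _ _ _ (by decide) h5
                    have h3 : leTup [(2:Int), (11:Int), (1:Int)] t = true := leTup_trans _ _ _ (by decide) h5
                    have h4 : leTup [(2:Int), (11:Int), (2:Int)] t = true := leTup_trans _ _ _ (by decide) h5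
                    simp [scanBest, bisectLoop, glibcVersionsSorted, bTable, ltTup_eq_not_leTup, pk0, pk1, pk2, pk3, pk4, pk5, pk6, lk5, h0, h1, h2, h3, h4, h5, h6]
                  · replace h5 : leTup [(2:Int), (11:Int), (3:Int)] t = false := by simpa using h5
                    by_cases h4 : leTup [(2:Int), (11:Int), (2:Int)] t = true
                    · have h0 : leTup [(2:Int), (3:Int), (6:Int)] t = true := leTup_trans _ _ _ (by decide) h4
                      have h1 : leTup [(2:Int), (7:Int)] t = true := leTup_trans _ _ _ (by decide) h4
                      have h2 : leTup [(2:Int), (11:Int)] t = true := leTup_trans _ _ _ (by decide) h4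
                      have h3 : leTup [(2:Int), (11:Int), (1:Int)] t = true := leTup_trans _ _ _ (by decide) h4
                      simp [scanBest, bisectLoop, glibcVersionsSorted, bTable, ltTup_eq_not_leTup, pk0, pk1, pk2, pk3, pk4, pk5, lk4, h0, h1, h2, h3, h4, h5, h6]
                    · replace h4 : leTup [(2:Int), (11:Int), (2:Int)] t = false := by simpa using h4
                      by_cases h3 : leTup [(2:Int), (11:Int), (1:Int)] t = true
                      · have h0 : leTup [(2:Int), (3:Int), (6:Int)] t = true := leTup_trans _ _ _ (by decide) h3
                        have h1 : leTup [(2:Int), (7:Int)] t = true := leTup_trans _ _ _ (by decide) h3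
                        have h2 : leTup [(2:Int), (11:Int)] t = true := leTup_trans _ _ _ (by decide) h3
                        simp [scanBest, bisectLoop, glibcVersionsSorted, bTable, ltTup_eq_not_leTup, pk0, pk1, pk2, pk3, pk4, lk3, h0, h1, h2, h3, h4, h5, h6]
                      · replace h3 : leTup [(2:Int), (11:Int), (1:Int)] t = false := by simpa using h3
                        by_cases h2 : leTup [(2:Int), (11:Int)] t = true
                        · have h0 : leTup [(2:Int), (3:Int), (6:Int)] t = true := leTup_trans _ _ _ (by decide) h2
                          have h1 : leTup [(2:Int), (7:Int)] t = true := leTup_trans _ _ _ (by decide) h2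
                          simp [scanBest, bisectLoop, glibcVersionsSorted, bTable, ltTup_eq_not_leTup, pk0, pk1, pk2, pk3, lk2, h0, h1, h2, h3, h6]
                        · replace h2 : leTup [(2:Int), (11:Int)] t = false := by simpa using h2
                          by_cases h1 : leTup [(2:Int), (7:Int)] t = true
                          · have h0 : leTup [(2:Int), (3:Int), (6:Int)] t = true := leTup_trans _ _ _ (by decide) h1
                            simp [scanBest, bisectLoop, glibcVersionsSorted, bTable, ltTup_eq_not_leTup, pk0, pk1, pk2, lk1, h0, h1, h2, h3, h6]
                          · replace h1 : leTup [(2:Int), (7:Int)] t = false := by simpa using h1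
                            by_cases h0 : leTup [(2:Int), (3:Int), (6:Int)] t = true
                            · simp [scanBest, bisectLoop, glibcVersionsSorted, bTable, ltTup_eq_not_leTup, pk0, pk1, lk0, h0, h1, h3, h6]
                            · replace h0 : leTup [(2:Int), (3:Int), (6:Int)] t = false := by simpa using h0
                              simp [scanBest, bisectLoop, glibcVersionsSorted, bTable, ltTup_eq_not_leTup, pk0, h0, h1, h3, h6]

theorem A_eq_B (g : String) : get_ubuntu_version g = get_ubuntu_version_alt g := by
  by_cases hg : g = ""
  · subst hg; decide
  · unfold get_ubuntu_version
    rw [if_neg hg]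
    rcases h : glibcToUbuntu.get? g with _ | v
    · rcases hp : pyTupOfStr? g with _ | t
      · simp only [get_ubuntu_version_alt, hp]
      · simp only [get_ubuntu_version_alt, hp]
        exact scan_eq_bisect t
    · -- exact-match branch: g is one of the 13 literal keys
      simp only [glibcToUbuntu, PySem.Dict.get?_mk_cons] at h
      by_cases e0 : ("2.3.6" == g) = true
      · rw [if_pos e0] at h
        obtain rfl := eq_of_beq e0
        injection h with h'
        subst h'
        simp [get_ubuntu_version_alt, bisectLoop, bTable, pk0, ltTup]
      · rw [if_neg e0] at h
        by_cases e1 : ("2.7" == g) = true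
        · rw [if_pos e1] at h
          obtain rfl := eq_of_beq e1
          injection h with h'
          subst h'
          simp [get_ubuntu_version_alt, bisectLoop, bTable, pk1, ltTup]
        · rw [if_neg e1] at h
          by_cases e2 : ("2.11" == g) = true
          · rw [if_pos e2] at h
            obtain rfl := eq_of_beq e2
            injection h with h'
            subst h'
            simp [get_ubuntu_version_alt, bisectLoop, bTable, pk2, ltTup]
          · rw [if_neg e2] at h
            by_cases e3 : ("2.11.1" == g) = true
            · rw [if_pos e3] at h
              obtain rfl := eq_of_beq e3
              injection h with h'
              subst h'
              simp [get_ubuntu_version_alt, bisectLoop, bTable, pk3, ltTup]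
            · rw [if_neg e3] at h
              by_cases e4 : ("2.11.2" == g) = true
              · rw [if_pos e4] at h
                obtain rfl := eq_of_beq e4
                injection h with h'
                subst h'
                simp [get_ubuntu_version_alt, bisectLoop, bTable, pk4, ltTup]
              · rw [if_neg e4] at h
                by_cases e5 : ("2.11.3" == g) = true
                · rw [if_pos e5] at h
                  obtain rfl := eq_of_beq e5
                  injection h with h'
                  subst h'
                  simp [get_ubuntu_version_alt, bisectLoop, bTable, pk5, ltTup]
                · rw [if_neg e5] at h
                  by_cases e6 : ("2.15" == g) = true
                  · rw [if_pos e6] at h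
                    obtain rfl := eq_of_beq e6
                    injection h with h'
                    subst h'
                    simp [get_ubuntu_version_alt, bisectLoop, bTable, pk6, ltTup]
                  · rw [if_neg e6] at h
                    by_cases e7 : ("2.19" == g) = true
                    · rw [if_pos e7] at h
                      obtain rfl := eq_of_beq e7
                      injection h with h'
                      subst h'
                      simp [get_ubuntu_version_alt, bisectLoop, bTable, pk7, ltTup]
                    · rw [if_neg e7] at h
                      by_cases e8 : ("2.23" == g) = true
                      · rw [if_pos e8] at h
                        obtain rfl := eq_of_beq e8
                        injection h with h'
                        subst h'
                        simp [get_ubuntu_version_alt, bisectLoop, bTable, pk8, ltTup]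
                      · rw [if_neg e8] at h
                        by_cases e9 : ("2.27" == g) = true
                        · rw [if_pos e9] at h
                          obtain rfl := eq_of_beq e9
                          injection h with h'
                          subst h'
                          simp [get_ubuntu_version_alt, bisectLoop, bTable, pk9, ltTup]
                        · rw [if_neg e9] at h
                          by_cases e10 : ("2.31" == g) = true
                          · rw [if_pos e10] at h
                            obtain rfl := eq_of_beq e10
                            injection h with h'
                            subst h'
                            simp [get_ubuntu_version_alt, bisectLoop, bTable, pk10, ltTup]
                          · rw [if_neg e10] at h
                            by_cases e11 : ("2.35" == g) = true
                            · rw [if_pos e11] at h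
                              obtain rfl := eq_of_beq e11
                              injection h with h'
                              subst h'
                              simp [get_ubuntu_version_alt, bisectLoop, bTable, pk11, ltTup]
                            · rw [if_neg e11] at h
                              by_cases e12 : ("2.39" == g) = true
                              · rw [if_pos e12] at h
                                obtain rfl := eq_of_beq e12
                                injection h with h'
                                subst h'
                                simp [get_ubuntu_version_alt, bisectLoop, bTable, pk12, ltTup]
                              · rw [if_neg e12] at h
                                simp [PySem.Dict.get?] at h

-- ===== VERDICT (by name: the statement is the Claim_ definition above) =====
theorem get_ubuntu_version_spec : Claim_equal_get_ubuntu_version := by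
  intro g _
  unfold Spec_get_ubuntu_version
  exact A_eq_B g
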